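-- pv_equiv track=rewrite | github.com/sjpkorea/xython.github.io | xython/pcell.py | move_list2d_by_index
-- ===== SOURCE A (Python) =====
-- def move_list2d_by_index(input_list2d, input_no_list):
-- 	"""
-- 	입력형태 : 2차원리스트, [[옮길것, 옮기고싶은자리].....]
-- 	메뉴에서 제외
--
-- 	:param input_list2d: list type 2dimension, 2차원의 리스트형
-- 	:param input_no_list:
-- 	:return:
-- 	"""
-- 	ori_no_dic = {}
-- 	for one in range(len(input_list2d[0])):
-- 		ori_no_dic[one] = one
-- 	for before, after in input_no_list:
-- 		new_before = ori_no_dic[before]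
-- 		new_after = ori_no_dic[after]
--
-- 		for no in range(len(input_list2d)):
-- 			if new_before < new_after:
-- 				new_after = after - 1
-- 			value = input_list2d[no][new_before]
-- 			del input_list2d[no][new_before]
-- 			input_list2d[no].insert(int(new_after), value)
-- 	return input_list2d
-- ===== SOURCE B (Python) =====
-- def move_list2d_by_index(input_list2d, input_no_list):
-- 	if not input_no_list:
-- 		return input_list2d
-- 	perm = list(range(len(input_list2d[0])))
-- 	for before, after in input_no_list:
-- 		target = after - 1 if before < after else after
-- 		perm.insert(target, perm.pop(before))
-- 	for row in input_list2d:
-- 		row[:] = [row[j] for j in perm]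
-- 	return input_list2d
-- ===== Notes on version B (the rewrite author's own statement) =====
-- stated objective: faster
-- what changed: B composes all moves into one index permutation (applied to a list of column indices once) and then remaps every row in a single pass, instead of A's per-move del/insert performed on every row.
-- outside the precondition, e.g. on move_list2d_by_index([[1, 2], [3, 4, 5]], [[1, 0]]): A returns [[2, 1], [4, 3, 5]], B returns [[2, 1], [4, 3]]
import Mathlib
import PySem

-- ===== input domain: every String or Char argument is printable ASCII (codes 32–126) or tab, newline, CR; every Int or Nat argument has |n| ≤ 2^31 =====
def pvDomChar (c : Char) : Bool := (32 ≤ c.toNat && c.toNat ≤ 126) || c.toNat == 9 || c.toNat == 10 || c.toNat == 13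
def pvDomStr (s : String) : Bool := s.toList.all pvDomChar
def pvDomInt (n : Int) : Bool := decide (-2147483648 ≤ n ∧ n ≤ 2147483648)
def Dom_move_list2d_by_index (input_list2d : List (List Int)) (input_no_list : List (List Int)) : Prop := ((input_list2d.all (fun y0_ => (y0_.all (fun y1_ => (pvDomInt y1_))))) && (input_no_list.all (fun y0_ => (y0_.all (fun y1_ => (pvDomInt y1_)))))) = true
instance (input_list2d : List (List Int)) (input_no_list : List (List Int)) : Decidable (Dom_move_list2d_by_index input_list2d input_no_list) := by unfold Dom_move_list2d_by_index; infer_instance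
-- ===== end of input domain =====

-- ===== PORT A =====
-- Equivalence is about the RETURN value: Python A mutates input_list2d in place (and B rebinds
-- its rows via row[:]=); the returned list is what is compared.
-- dict identity lookup: ori_no_dic[one] = one  (indices in range under Pre_, so getD's default is never used)
def pvA_dict (c : Int) : PySem.Dict Int Int :=
  (PySem.List.pyRange 0 c 1).foldl (fun d one => d.insert one one) PySem.Dict.empty

-- body of A's inner 'for no in range(len(input_list2d))' loop (state: the 2D list and new_after)
def pvA_inner (new_before after : Int) (st : List (List Int) × Int) (no : Int) : List (List Int) × Int :=
  let new_after := if new_before < st.2 then after - 1 else st.2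
  let row := PySem.List.pyGetD st.1 no []
  let value := PySem.List.pyGetD row new_before 0
  let row := ((PySem.List.pop? row new_before).getD (0, row)).2  -- del row[new_before] (in range under Pre_)
  let row := PySem.List.insert row new_after value               -- row.insert(int(new_after), value)
  (st.1.set no.toNat row, new_after)

-- body of A's outer 'for before, after in input_no_list' loop
def pvA_move (ori : PySem.Dict Int Int) (l2d : List (List Int)) (pair : List Int) : List (List Int) :=
  match pair with
  | [before, after] =>
    let new_before := ori.getD before 0
    let new_after := ori.getD after 0
    ((PySem.List.pyRange 0 (l2d.length : Int) 1).foldl (pvA_inner new_before after) (l2d, new_after)).1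
  | _ => l2d  -- unpacking 'before, after = pair' raises unless the pair has exactly 2 items (excluded by Pre_)

def move_list2d_by_index (input_list2d : List (List Int)) (input_no_list : List (List Int)) : List (List Int) :=
  let ori := pvA_dict ((PySem.List.pyGetD input_list2d 0 []).length : Int)
  input_no_list.foldl (pvA_move ori) input_list2d

-- ===== PORT B =====
-- one move applied to the index list perm: perm.insert(target, perm.pop(before))
def pvB_move (perm : List Int) (pair : List Int) : List Int :=
  match pair with
  | [before, after] =>
    let target := if before < after then after - 1 else after
    let popped := (PySem.List.pop? perm before).getD (0, perm)   -- in range under Pre_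
    PySem.List.insert popped.2 target popped.1
  | _ => perm  -- unpacking raises unless the pair has exactly 2 items (excluded by Pre_)

-- row[:] = [row[j] for j in perm]
def pvB_remap (perm : List Int) (row : List Int) : List Int :=
  perm.map (fun j => PySem.List.pyGetD row j 0)

def move_list2d_by_index_alt (input_list2d : List (List Int)) (input_no_list : List (List Int)) : List (List Int) :=
  if input_no_list.isEmpty then input_list2d else   -- no moves: nothing to do
  let perm0 := PySem.List.pyRange 0 ((PySem.List.pyGetD input_list2d 0 []).length : Int) 1
  let perm := input_no_list.foldl pvB_move perm0
  input_list2d.map (pvB_remap perm)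

-- ===== PRECONDITION & SPEC =====
-- Pre_ admits a NONEMPTY 2D list together with either no moves at all, or a RECTANGULAR 2D list and
-- moves that are [from, to] pairs of in-range column indices. Outside it A raises (empty list:
-- IndexError; bad pair shape: ValueError; out-of-range index: KeyError/IndexError) — except on RAGGED
-- 2D lists with a nonempty move list, which Pre_ excludes because A's positional per-row shifting of
-- the cells beyond the first row's width is an accident of its implementation (the column permutation
-- is only defined for the table width); see claim.json "cites".
def Pre_move_list2d_by_index (input_list2d : List (List Int)) (input_no_list : List (List Int)) : Prop :=
  input_list2d ≠ [] ∧
  (input_no_list = [] ∨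
    ((∀ r ∈ input_list2d, r.length = (input_list2d.headD []).length) ∧
     (∀ p ∈ input_no_list, p.length = 2 ∧
       ∀ x ∈ p, 0 ≤ x ∧ x < ((input_list2d.headD []).length : Int))))

instance (input_list2d : List (List Int)) (input_no_list : List (List Int)) : Decidable (Pre_move_list2d_by_index input_list2d input_no_list) := by unfold Pre_move_list2d_by_index; infer_instance

def pvWitness_move_list2d_by_index : List (List Int) × List (List Int) := ([[1, 2, 3], [4, 5, 6]], [[0, 2], [2, 1]])

def Spec_move_list2d_by_index (input_list2d : List (List Int)) (input_no_list : List (List Int)) (out : List (List Int)) : Prop := out = move_list2d_by_index_alt input_list2d input_no_list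
instance (input_list2d : List (List Int)) (input_no_list : List (List Int)) (out : List (List Int)) : Decidable (Spec_move_list2d_by_index input_list2d input_no_list out) := by unfold Spec_move_list2d_by_index; infer_instance

-- ===== CLAIM (what is proved, stated in full; the proofs are below) =====
def Claim_equal_move_list2d_by_index : Prop := ∀ (input_list2d : List (List Int)) (input_no_list : List (List Int)), Dom_move_list2d_by_index input_list2d input_no_list → Pre_move_list2d_by_index input_list2d input_no_list → Spec_move_list2d_by_index input_list2d input_no_list (move_list2d_by_index input_list2d input_no_list)

-- ===== LEMMAS AND PROOFS =====

-- the target index every row actually uses in A's inner loop (new_after after its first update)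
def pvTarget (b a : Int) : Int := if b < a then a - 1 else a

-- what A does to one row in one move: del at b, insert at pvTarget
def pvOpRow (b t : Int) (row : List Int) : List Int :=
  PySem.List.insert (row.eraseIdx b.toNat) t (PySem.List.pyGetD row b 0)

-- ---- the identity dict ----
lemma getD_foldl_id_not_mem (L : List Int) (d : PySem.Dict Int Int) (k : Int) (h : k ∉ L) :
    (L.foldl (fun d i => d.insert i i) d).getD k 0 = d.getD k 0 := by
  induction L generalizing d with
  | nil => rfl
  | cons i L ih =>
    simp only [List.mem_cons, not_or] at h
    simp only [List.foldl_cons]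
    rw [ih _ h.2, PySem.Dict.getD_insert_of_ne _ _ _ h.1]

lemma getD_foldl_id_mem (L : List Int) (d : PySem.Dict Int Int) (k : Int) (h : k ∈ L) :
    (L.foldl (fun d i => d.insert i i) d).getD k 0 = k := by
  induction L generalizing d with
  | nil => simp at h
  | cons i L ih =>
    simp only [List.foldl_cons]
    by_cases hk : k ∈ L
    · exact ih _ hk
    · have : k = i := by rcases List.mem_cons.mp h with h' | h' <;> tauto
      subst this
      rw [getD_foldl_id_not_mem _ _ _ hk, PySem.Dict.getD_insert_self]

lemma pvA_dict_getD (c : Int) (k : Int) (h0 : 0 ≤ k) (h1 : k < c) :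
    (pvA_dict c).getD k 0 = k := by
  unfold pvA_dict
  exact getD_foldl_id_mem _ _ _ (PySem.List.mem_pyRange_one.mpr ⟨h0, h1⟩)

-- ---- remap basics ----
lemma length_pvB_remap (p r : List Int) : (pvB_remap p r).length = p.length := by
  simp [pvB_remap]

lemma pvB_remap_id (r : List Int) :
    pvB_remap (PySem.List.pyRange 0 (r.length : Int) 1) r = r := by
  simpa [pvB_remap] using PySem.List.map_pyGetD_pyRange_zero' r 0

-- ---- one move commutes with remapping ----
lemma length_pvB_move (p : List Int) (b a : Int) (hb0 : 0 ≤ b) (hb : b < (p.length : Int)) :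
    (pvB_move p [b, a]).length = p.length := by
  have hbn : b.toNat < p.length := by omega
  have hpop := PySem.List.pop?_natCast p b.toNat hbn
  rw [Int.toNat_of_nonneg hb0] at hpop
  simp only [pvB_move, hpop, Option.getD_some, PySem.List.length_insert,
    List.length_eraseIdx, if_pos hbn]
  omega

lemma pvB_move_remap (p r : List Int) (b a : Int)
    (hb0 : 0 ≤ b) (hb : b < (p.length : Int)) (ha0 : 0 ≤ a) (ha : a < (p.length : Int)) :
    pvB_remap (pvB_move p [b, a]) r = pvOpRow b (pvTarget b a) (pvB_remap p r) := by
  have hbn : b.toNat < p.length := by omega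
  have hpop := PySem.List.pop?_natCast p b.toNat hbn
  rw [Int.toNat_of_nonneg hb0] at hpop
  have ht0 : 0 ≤ pvTarget b a := by unfold pvTarget; split <;> omega
  obtain ⟨tn, htn⟩ : ∃ tn : Nat, pvTarget b a = (tn : Int) :=
    ⟨(pvTarget b a).toNat, (Int.toNat_of_nonneg ht0).symm⟩
  have hlen1 : (p.eraseIdx b.toNat).length = p.length - 1 := by
    rw [List.length_eraseIdx, if_pos hbn]
  have hle : pvTarget b a ≤ (p.length : Int) - 1 := by unfold pvTarget; split <;> omega
  have htlen : tn ≤ (p.eraseIdx b.toNat).length := by omega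
  have hrm : b < ((pvB_remap p r).length : Int) := by rw [length_pvB_remap]; exact hb
  have hval : PySem.List.pyGetD (pvB_remap p r) b 0
      = PySem.List.pyGetD r p[b.toNat] 0 := by
    rw [PySem.List.pyGetD_eq_getElem _ 0 hb0 hrm]
    simp [pvB_remap]
  have hrmerase : (pvB_remap p r).eraseIdx b.toNat = pvB_remap (p.eraseIdx b.toNat) r := by
    simp [pvB_remap, List.eraseIdx_map]
  have htlen2 : tn ≤ (pvB_remap (p.eraseIdx b.toNat) r).length := by
    rw [length_pvB_remap]; exact htlen
  simp only [pvB_move, hpop, Option.getD_some]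
  unfold pvOpRow
  rw [hval, hrmerase]
  rw [show (if b < a then a - 1 else a) = ((tn : Nat) : Int) from by rw [← htn]; rfl, htn]
  rw [PySem.List.insert_natCast _ _ _ htlen, PySem.List.insert_natCast _ _ _ htlen2]
  simp [pvB_remap, List.map_take, List.map_drop]

-- ---- A's inner loop maps every row with pvOpRow ----
lemma pvA_inner_prefix (b a : Int) (c : Nat)
    (hb0 : 0 ≤ b) (hb : b < (c : Int)) (ha0 : 0 ≤ a) (ha : a < (c : Int))
    (L : List (List Int)) (hL : ∀ r ∈ L, r.length = c)
    (k : Nat) (hk : k ≤ L.length) :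
    (PySem.List.pyRange 0 (k : Int) 1).foldl (pvA_inner b a) (L, a)
      = ((L.take k).map (pvOpRow b (pvTarget b a)) ++ L.drop k,
         if k = 0 then a else pvTarget b a) := by
  induction k with
  | zero => simp [PySem.List.pyRange]
  | succ k ih =>
    have hk' : k ≤ L.length := by omega
    have hklt : k < L.length := by omega
    have hcast : ((k : Int) + 1) = ((k + 1 : Nat) : Int) := by push_cast; ring
    rw [← hcast, PySem.List.pyRange_one_succ_right (by positivity), List.foldl_append,
      ih hk']
    simp only [List.foldl_cons, List.foldl_nil]
    -- compute one step of pvA_inner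
    have hdrop := List.drop_eq_getElem_cons hklt
    have hrowlen : L[k].length = c := hL _ (List.getElem_mem hklt)

    have hlen1 : ((L.take k).map (pvOpRow b (pvTarget b a))).length = k := by
      rw [List.length_map, List.length_take]; omega
    have hMget : PySem.List.pyGetD ((L.take k).map (pvOpRow b (pvTarget b a)) ++ L.drop k) (k : Int) []
        = L[k] := by
      rw [PySem.List.pyGetD_natCast, hdrop, List.getD_eq_getElem?_getD,
        List.getElem?_append_right hlen1.le, hlen1]
      simp [List.getElem?_eq_getElem hklt]
    have hna : (if b < (if k = 0 then a else pvTarget b a) then a - 1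
        else (if k = 0 then a else pvTarget b a)) = pvTarget b a := by
      unfold pvTarget
      by_cases hk0 : k = 0 <;> simp [hk0] <;> split_ifs <;> omega
    unfold pvA_inner
    simp only [hna, hMget]
    have hbn : b.toNat < L[k].length := by omega
    have hpop := PySem.List.pop?_natCast L[k] b.toNat hbn
    rw [Int.toNat_of_nonneg hb0] at hpop
    simp only [hpop, Option.getD_some]
    congr 1
    -- the set at position k extends the mapped prefix
    have hset : ((L.take k).map (pvOpRow b (pvTarget b a)) ++ L.drop k).set ((k : Int)).toNat
        (PySem.List.insert (L[k].eraseIdx b.toNat) (pvTarget b a) (PySem.List.pyGetD L[k] b 0))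
        = (L.take (k + 1)).map (pvOpRow b (pvTarget b a)) ++ L.drop (k + 1) := by
      rw [Int.toNat_natCast, hdrop,
        List.set_append_right _ _ hlen1.le, hlen1, Nat.sub_self, List.set_cons_zero,
        List.take_add_one, List.getElem?_eq_getElem hklt]
      simp only [Option.toList_some, List.map_append, List.map_cons, List.map_nil, List.map_take]
      unfold pvOpRow
      simp
    exact hset

lemma pvA_inner_loop (b a : Int) (c : Nat)
    (hb0 : 0 ≤ b) (hb : b < (c : Int)) (ha0 : 0 ≤ a) (ha : a < (c : Int))
    (L : List (List Int)) (hL : ∀ r ∈ L, r.length = c) :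
    ((PySem.List.pyRange 0 (L.length : Int) 1).foldl (pvA_inner b a) (L, a)).1
      = L.map (pvOpRow b (pvTarget b a)) := by
  rw [pvA_inner_prefix b a c hb0 hb ha0 ha L hL L.length (le_refl _)]
  simp

-- ---- one whole move of A on a remapped table ----
lemma pvA_move_step (c : Nat) (ori : PySem.Dict Int Int)
    (hori : ∀ k : Int, 0 ≤ k → k < (c : Int) → ori.getD k 0 = k)
    (l2d : List (List Int)) (p : List Int) (hp : p.length = c) (b a : Int)
    (hb0 : 0 ≤ b) (hb : b < (c : Int)) (ha0 : 0 ≤ a) (ha : a < (c : Int)) :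
    pvA_move ori (l2d.map (pvB_remap p)) [b, a]
      = l2d.map (pvB_remap (pvB_move p [b, a])) := by
  simp only [pvA_move, hori b hb0 hb, hori a ha0 ha]
  have hL : ∀ r ∈ l2d.map (pvB_remap p), r.length = c := by
    intro r hr
    rcases List.mem_map.mp hr with ⟨r0, _, rfl⟩
    rw [length_pvB_remap, hp]
  rw [pvA_inner_loop b a c hb0 hb ha0 ha _ hL]
  rw [List.map_map]
  apply List.map_congr_left
  intro r _
  simp only [Function.comp]
  rw [pvB_move_remap p r b a hb0 (by rw [hp]; exact hb) ha0 (by rw [hp]; exact ha)]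

-- ---- the full fold ----
lemma pvMain (c : Nat) (ori : PySem.Dict Int Int)
    (hori : ∀ k : Int, 0 ≤ k → k < (c : Int) → ori.getD k 0 = k)
    (nl : List (List Int))
    (hnl : ∀ pr ∈ nl, pr.length = 2 ∧ ∀ x ∈ pr, 0 ≤ x ∧ x < (c : Int))
    (l2d : List (List Int)) (p : List Int) (hp : p.length = c) :
    nl.foldl (pvA_move ori) (l2d.map (pvB_remap p))
      = l2d.map (pvB_remap (nl.foldl pvB_move p)) := by
  induction nl generalizing p with
  | nil => rfl
  | cons pr nl ih =>
    obtain ⟨hlen, hbound⟩ := hnl pr (List.mem_cons_self ..)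
    obtain ⟨b, a, rfl⟩ : ∃ b a, pr = [b, a] := by
      match pr, hlen with
      | [b, a], _ => exact ⟨b, a, rfl⟩
    have hb := hbound b (by simp)
    have ha := hbound a (by simp)
    simp only [List.foldl_cons]
    rw [pvA_move_step c ori hori l2d p hp b a hb.1 hb.2 ha.1 ha.2]
    exact ih (fun pr h => hnl pr (List.mem_cons_of_mem _ h)) _
      (by rw [length_pvB_move p b a hb.1 (by rw [hp]; exact hb.2)]; exact hp)

-- ===== VERDICT (by name: the statement is the Claim_ definition above) =====
theorem move_list2d_by_index_spec : Claim_equal_move_list2d_by_index := by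
  intro l2d nl _ hpre
  obtain ⟨hne, hcase⟩ := hpre
  unfold Spec_move_list2d_by_index move_list2d_by_index move_list2d_by_index_alt
  rcases hcase with rfl | ⟨hrect, hnl⟩
  · simp
  by_cases hnle : nl.isEmpty
  · rw [List.isEmpty_iff] at hnle
    subst hnle; simp
  rw [if_neg hnle]
  obtain ⟨r, rest, rfl⟩ : ∃ r rest, l2d = r :: rest := by
    cases l2d with
    | nil => exact absurd rfl hne
    | cons r rest => exact ⟨r, rest, rfl⟩
  have hhead : PySem.List.pyGetD (r :: rest) 0 [] = r := by
    have := PySem.List.pyGetD_natCast (r :: rest) 0 []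
    simpa using this
  rw [hhead]
  have hcd : (r :: rest).headD [] = r := rfl
  rw [hcd] at hrect hnl
  have hp0 : (PySem.List.pyRange 0 (r.length : Int) 1).length = r.length := by
    rw [PySem.List.length_pyRange_one]; omega
  have hid : (r :: rest).map (pvB_remap (PySem.List.pyRange 0 (r.length : Int) 1)) = r :: rest := by
    trans (r :: rest).map id
    · apply List.map_congr_left
      intro row hrow
      have hlen : row.length = r.length := hrect row hrow
      show pvB_remap (PySem.List.pyRange 0 (r.length : Int) 1) row = row
      rw [show ((r.length : Int)) = (row.length : Int) from by rw [hlen]]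
      exact pvB_remap_id row
    · simp
  conv_lhs => rw [← hid]
  exact pvMain r.length _ (fun k h0 h1 => pvA_dict_getD (r.length : Int) k h0 h1)
    nl hnl (r :: rest) _ hp0
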